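-- pv_equiv track=rewrite | github.com/vitacore-dev/Email-Intelligence-Collector | backend/modules/digital_twin.py | _get_position_importance
-- ===== SOURCE A (Python) =====
-- def _get_position_importance(position: str) -> int:
--     """Оценка важности должности (1-5)"""
--     position_lower = position.lower()
--     if any(title in position_lower for title in ['professor', 'dean', 'chair']):
--         return 5
--     elif 'researcher' in position_lower or 'scientist' in position_lower:
--         return 3
--     elif 'student' in position_lower:
--         return 1
--     else:
--         return 2
-- ===== SOURCE B (Python) =====
-- _POSITION_SCORES = {
--     'professor': 5,
--     'dean': 5,
--     'chair': 5,
--     'researcher': 3,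
--     'scientist': 3,
--     'student': 1,
-- }
--
-- def _get_position_importance(position: str) -> int:
--     """Score table: collect scores of every keyword found, take the max (default 2)."""
--     position_lower = position.lower()
--     matched = [score for kw, score in _POSITION_SCORES.items() if kw in position_lower]
--     return max(matched, default=2)
-- ===== Notes on version B (the rewrite author's own statement) =====
-- stated objective: simpler
-- what changed: Replaces the elif chain with a keyword-to-score table: collect the scores of all keywords occurring in the lowercased position and return their max, default 2 (equal to A because branch scores are strictly descending).
import Mathlib
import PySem

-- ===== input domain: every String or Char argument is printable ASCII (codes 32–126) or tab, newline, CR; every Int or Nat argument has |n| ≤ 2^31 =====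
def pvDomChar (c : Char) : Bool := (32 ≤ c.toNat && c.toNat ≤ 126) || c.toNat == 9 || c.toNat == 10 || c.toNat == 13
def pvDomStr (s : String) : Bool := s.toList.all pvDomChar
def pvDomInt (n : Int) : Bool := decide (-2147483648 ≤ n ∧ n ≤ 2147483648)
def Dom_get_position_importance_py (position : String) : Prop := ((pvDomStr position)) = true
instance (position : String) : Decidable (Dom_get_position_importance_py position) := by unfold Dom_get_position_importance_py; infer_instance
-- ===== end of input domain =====

-- B replaces the elif chain by a keyword→score table aggregated with max (default 2); objective: simpler.


-- ===== PORT A =====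
def get_position_importance_py (position : String) : Int :=
  let position_lower := PySem.Str.lower position
  if (["professor", "dean", "chair"].any (fun title => PySem.Str.isIn title position_lower)) then 5
  else if PySem.Str.isIn "researcher" position_lower || PySem.Str.isIn "scientist" position_lower then 3
  else if PySem.Str.isIn "student" position_lower then 1
  else 2

-- ===== PORT B =====
def pvPositionScores : List (String × Int) :=
  [("professor", 5), ("dean", 5), ("chair", 5), ("researcher", 3), ("scientist", 3), ("student", 1)]

def get_position_importance_py_alt (position : String) : Int :=
  let position_lower := PySem.Str.lower position
  let matched := (pvPositionScores.filter (fun kw_score => PySem.Str.isIn kw_score.1 position_lower)).map Prod.snd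
  (PySem.List.max? matched (fun s => s)).getD 2

-- ===== PRECONDITION & SPEC =====
def Spec_get_position_importance_py (position : String) (out : Int) : Prop := out = get_position_importance_py_alt position
instance (position : String) (out : Int) : Decidable (Spec_get_position_importance_py position out) := by unfold Spec_get_position_importance_py; infer_instance

-- ===== CLAIM (what is proved, stated in full; the proofs are below) =====
def Claim_equal_get_position_importance_py : Prop := ∀ (position : String), Dom_get_position_importance_py position → Spec_get_position_importance_py position (get_position_importance_py position)

-- ===== LEMMAS AND PROOFS =====

-- ===== VERDICT (by name: the statement is the Claim_ definition above) =====
theorem get_position_importance_py_spec : Claim_equal_get_position_importance_py := by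
  intro position _
  unfold Spec_get_position_importance_py get_position_importance_py get_position_importance_py_alt
  cases h1 : PySem.Str.isIn "professor" (PySem.Str.lower position) <;>
  cases h2 : PySem.Str.isIn "dean" (PySem.Str.lower position) <;>
  cases h3 : PySem.Str.isIn "chair" (PySem.Str.lower position) <;>
  cases h4 : PySem.Str.isIn "researcher" (PySem.Str.lower position) <;>
  cases h5 : PySem.Str.isIn "scientist" (PySem.Str.lower position) <;>
  cases h6 : PySem.Str.isIn "student" (PySem.Str.lower position) <;>
  simp at h1 h2 h3 h4 h5 h6 <;>
  simp [pvPositionScores, h1, h2, h3, h4, h5, h6, PySem.List.max?]
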